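-- pv_equiv track=rewrite | github.com/ovnie/ovnie | python/nbpresqueparfait.py | est_presque_parfait
-- ===== SOURCE A (Python) =====
-- def est_presque_parfait(n):
--
--
--     som_div=0
--
--
--     diviseur=1
--
--
--     while (diviseur<n):
--
--
--         if ((n%diviseur)==0):
--
--
--            som_div+=diviseur #som_div=som_div+diviseur
--
--
--         diviseur+=1 #diviseur=diviseur+1
--
--
--     return(som_div==(n-1) or som_div==(n+1))
-- ===== SOURCE B (Python) =====
-- def est_presque_parfait(n):
--     if n <= 0:
--         return False
--     s = 0
--     d = 1
--     while d * d <= n: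
--         if n % d == 0:
--             s += d
--             e = n // d
--             if e != d:
--                 s += e
--         d += 1
--     s -= n
--     return s == n - 1 or s == n + 1
-- ===== Notes on version B (the rewrite author's own statement) =====
-- stated objective: faster
-- what changed: B sums divisors in complementary pairs (d, n//d) while d*d <= n instead of trial-dividing every integer below n, and returns False outright for non-positive n.
-- intended difference: On n = -1 A returns True (its empty-loop sum 0 accidentally equals n+1), while B returns False, which is intended since no negative number is almost perfect. — e.g. on est_presque_parfait(-1): A returns true, B returns false
import Mathlib
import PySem

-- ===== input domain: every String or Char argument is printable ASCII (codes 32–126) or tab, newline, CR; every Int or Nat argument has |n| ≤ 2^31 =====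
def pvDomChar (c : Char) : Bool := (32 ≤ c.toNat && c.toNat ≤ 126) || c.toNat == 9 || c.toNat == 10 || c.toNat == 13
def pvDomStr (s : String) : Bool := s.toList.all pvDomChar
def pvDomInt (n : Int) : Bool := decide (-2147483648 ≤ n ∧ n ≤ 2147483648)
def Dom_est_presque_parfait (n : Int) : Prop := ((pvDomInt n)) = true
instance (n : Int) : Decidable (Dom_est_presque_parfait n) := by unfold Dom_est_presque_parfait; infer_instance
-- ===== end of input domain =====

-- B replaces A's trial division over every integer below n by the paired-divisor sum up to sqrt(n)
-- and returns False outright for n <= 0; the only behavioural difference is at n = -1 (see D_ below).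

-- ===== PORT A =====
-- while diviseur < n: if n % diviseur == 0: som_div += diviseur; diviseur += 1
def est_presque_parfait (n : Int) : Bool :=
  let som_div := (PySem.List.pyRange 1 n 1).foldl
    (fun s d => if PySem.Int.mod n d = 0 then s + d else s) 0
  som_div == n - 1 || som_div == n + 1

-- ===== PORT B =====
-- while d * d <= n: if n % d == 0: s += d; e = n // d; if e != d: s += e; d += 1
def est_presque_parfait_altLoop (n d s : Int) : Int :=
  if _h : d * d ≤ n then
    est_presque_parfait_altLoop n (d + 1)
      (if PySem.Int.mod n d = 0 then
        (let e := PySem.Int.floordiv n d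
         if e ≠ d then s + d + e else s + d)
       else s)
  else s
termination_by (n + 1 - d).toNat
decreasing_by
  have hd : d ≤ d * d := by nlinarith [mul_self_nonneg (2 * d - 1)]
  omega

def est_presque_parfait_alt (n : Int) : Bool :=
  if n ≤ 0 then false
  else
    let s := est_presque_parfait_altLoop n 1 0 - n
    s == n - 1 || s == n + 1

-- ===== PRECONDITION & SPEC =====
-- On n = -1 A returns True (its empty-loop sum 0 accidentally equals n + 1), while B returns
-- False, which is intended since no negative number is almost perfect.
def D_est_presque_parfait (n : Int) : Prop := n = -1
instance (n : Int) : Decidable (D_est_presque_parfait n) := by unfold D_est_presque_parfait; infer_instance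
def Spec_est_presque_parfait (n : Int) (out : Bool) : Prop := ¬ D_est_presque_parfait n → out = est_presque_parfait_alt n
instance (n : Int) (out : Bool) : Decidable (Spec_est_presque_parfait n out) := by unfold Spec_est_presque_parfait; infer_instance

def pvDiffWitness_est_presque_parfait : Int := (-1)
def pvDiffWitnessOut_est_presque_parfait : Bool × Bool := (true, false)

-- ===== CLAIM (what is proved, stated in full; the proofs are below) =====
def Claim_unchanged_est_presque_parfait : Prop := ∀ (n : Int), Dom_est_presque_parfait n → Spec_est_presque_parfait n (est_presque_parfait n)
def Claim_changed_est_presque_parfait : Prop := Dom_est_presque_parfait (pvDiffWitness_est_presque_parfait) ∧ D_est_presque_parfait (pvDiffWitness_est_presque_parfait) ∧ est_presque_parfait (pvDiffWitness_est_presque_parfait) = pvDiffWitnessOut_est_presque_parfait.1 ∧ est_presque_parfait_alt (pvDiffWitness_est_presque_parfait) = pvDiffWitnessOut_est_presque_parfait.2 ∧ pvDiffWitnessOut_est_presque_parfait.1 ≠ pvDiffWitnessOut_est_presque_parfait.2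
def Claim_exact_est_presque_parfait : Prop := ∀ (n : Int), Dom_est_presque_parfait n → D_est_presque_parfait n → est_presque_parfait n ≠ est_presque_parfait_alt n

-- ===== LEMMAS AND PROOFS =====

-- sum of proper divisors of m (what A's loop accumulates)
def AsumNat (m : Nat) : Nat := ∑ k ∈ Finset.Ico 1 m, if k ∣ m then k else 0
-- paired-divisor sum up to sqrt m (what B's loop accumulates)
def BsumNat (m : Nat) : Nat :=
  ∑ k ∈ Finset.Ico 1 (Nat.sqrt m + 1), if k ∣ m then (if m / k = k then k else k + m / k) else 0

lemma asum_tail (m : Nat) :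
    ∑ i ∈ Finset.range (m-1), (if PySem.Int.mod (m:Int) (1 + (i:Int)) = 0 then 1 + (i:Int) else 0)
      = (AsumNat m : Int) := by
  unfold AsumNat
  push_cast
  rw [Finset.sum_Ico_eq_sum_range]
  apply Finset.sum_congr rfl
  intro i _
  have h1 : (1 + (i:Int)) = ((1 + i : Nat) : Int) := by push_cast; ring
  rw [h1, PySem.Int.mod_natCast]
  have h2 : ((↑(m % (1+i)) = (0:Int)) ↔ (1+i) ∣ m) := by
    rw [Nat.cast_eq_zero]
    omega
  simp only [h2]

lemma asum_eq (m : Nat) :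
    (PySem.List.pyRange 1 (m : Int) 1).foldl
      (fun s d => if PySem.Int.mod (m : Int) d = 0 then s + d else s) 0 = (AsumNat m : Int) := by
  have hcongr : ∀ (l : List Int) (init : Int),
      l.foldl (fun s d => if PySem.Int.mod (m : Int) d = 0 then s + d else s) init
        = l.foldl (fun s d => s + (if PySem.Int.mod (m : Int) d = 0 then d else 0)) init := by
    intro l
    induction l with
    | nil => intro init; rfl
    | cons x xs ih =>
      intro init
      simp only [List.foldl_cons]
      rw [ih]
      congr 1
      split_ifs <;> simp
  rw [hcongr, PySem.List.foldl_add, PySem.List.pyRange_one, List.map_map]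
  have hto : ((m : Int) - 1).toNat = m - 1 := by omega
  rw [hto]
  have hlist : (List.map ((fun d => if PySem.Int.mod (m:Int) d = 0 then d else 0) ∘ fun k : Nat => (1:Int) + ↑k) (List.range (m-1))).sum
      = ∑ i ∈ Finset.range (m-1), (if PySem.Int.mod (m:Int) (1 + (i:Int)) = 0 then 1 + (i:Int) else 0) := rfl
  rw [hlist, asum_tail m]
  ring

lemma bloop_eq (m : Nat) :
    ∀ (t d : Nat) (s : Int), 1 ≤ d → Nat.sqrt m + 1 - d ≤ t →
      est_presque_parfait_altLoop (m : Int) (d : Int) s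
        = s + ↑(∑ k ∈ Finset.Ico d (Nat.sqrt m + 1),
            if k ∣ m then (if m / k = k then k else k + m / k) else 0) := by
  intro t
  induction t with
  | zero =>
    intro d s hd ht
    have hlt : m < d * d := Nat.sqrt_lt.mp (by omega)
    rw [est_presque_parfait_altLoop, dif_neg (by exact_mod_cast by omega)]
    rw [Finset.Ico_eq_empty (by omega)]
    simp
  | succ t ih =>
    intro d s hd ht
    by_cases hdr : d ≤ Nat.sqrt m
    · have hle : d * d ≤ m := Nat.le_sqrt.mp hdr
      rw [est_presque_parfait_altLoop, dif_pos (by exact_mod_cast hle : ((d:Int) * d ≤ (m:Int)))]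
      rw [Finset.sum_eq_sum_Ico_succ_bot (show d < Nat.sqrt m + 1 by omega)]
      have hcast : ((d:Int) + 1) = ((d + 1 : Nat) : Int) := by push_cast; ring
      rw [hcast, PySem.Int.mod_natCast, PySem.Int.floordiv_natCast,
          ih (d+1) _ (by omega) (by omega)]
      have hmod : ((↑(m % d) = (0:Int)) ↔ d ∣ m) := by rw [Nat.cast_eq_zero]; omega
      have hfd : (((m / d : Nat) : Int) = (d:Int)) ↔ m / d = d := Nat.cast_inj
      by_cases hdvd : d ∣ m
      · by_cases heq : m / d = d
        · simp only [hmod, if_pos hdvd, heq, ne_eq, not_true_eq_false, if_false]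
          push_cast
          ring
        · simp only [hmod, if_pos hdvd, if_neg heq, ne_eq, hfd]
          rw [if_pos heq]
          push_cast
          ring
      · simp only [hmod, if_neg hdvd]
        push_cast
        ring
    · have hlt : m < d * d := Nat.sqrt_lt.mp (by omega)
      rw [est_presque_parfait_altLoop, dif_neg (by exact_mod_cast by omega)]
      rw [Finset.Ico_eq_empty (by omega)]
      simp

-- the sqrt split: for a divisor k of m, the cofactor m / k exceeds sqrt m exactly when k is a
-- small divisor that is not the square root itself
lemma sqrt_split (m k : Nat) (hm : 1 ≤ m) (hk : k ∣ m) (hk1 : 1 ≤ k) :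
    (Nat.sqrt m < m / k ↔ k ≤ Nat.sqrt m ∧ m / k ≠ k) := by
  have hr1 : 1 ≤ Nat.sqrt m := Nat.sqrt_pos.mpr hm
  have hr2 : Nat.sqrt m * Nat.sqrt m ≤ m := by
    have h := Nat.sqrt_le' m; rwa [pow_two] at h
  have hr3 : m < (Nat.sqrt m + 1) * (Nat.sqrt m + 1) := Nat.lt_succ_sqrt m
  have hmk : k * (m / k) = m := Nat.mul_div_cancel' hk
  constructor
  · intro h
    have hkr : k ≤ Nat.sqrt m := by
      by_contra hc
      have := Nat.mul_le_mul (by omega : Nat.sqrt m + 1 ≤ k) (by omega : Nat.sqrt m + 1 ≤ m / k)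
      omega
    exact ⟨hkr, by omega⟩
  · rintro ⟨h1, h2⟩
    by_contra h3
    have hle : m / k ≤ Nat.sqrt m := by omega
    have e1 : k * (m / k) ≤ Nat.sqrt m * Nat.sqrt m := Nat.mul_le_mul h1 hle
    have e2 : k * (m / k) = Nat.sqrt m * Nat.sqrt m := by omega
    have hkr : k = Nat.sqrt m := by nlinarith
    have : m / k = Nat.sqrt m := by nlinarith
    omega

-- pairing small divisors with their cofactors: B's sum is A's sum plus m itself
lemma pair_sum (m : Nat) (hm : 1 ≤ m) : BsumNat m = AsumNat m + m := by
  have hdiv : m.divisors = Finset.filter (· ∣ m) (Finset.Ico 1 (m+1)) := by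
    ext k
    simp only [Nat.mem_divisors, Finset.mem_filter, Finset.mem_Ico]
    constructor
    · rintro ⟨h, _⟩
      exact ⟨⟨Nat.pos_of_dvd_of_pos h hm, Nat.lt_succ_of_le (Nat.le_of_dvd hm h)⟩, h⟩
    · rintro ⟨_, h⟩
      exact ⟨h, by omega⟩
  have hA : ∑ k ∈ m.divisors, k = AsumNat m + m := by
    rw [hdiv, Finset.sum_filter]
    rw [Finset.sum_Ico_succ_top (by omega : 1 ≤ m)]
    unfold AsumNat
    rw [if_pos (dvd_refl m)]
  set r := Nat.sqrt m with hrdef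
  have hB : BsumNat m = ∑ k ∈ m.divisors, k := by
    have step1 : (∑ k ∈ Finset.Ico 1 (m + 1),
          if k ∣ m then (if k ≤ r then (if m / k = k then k else k + m / k) else 0) else 0)
        = ∑ k ∈ Finset.Ico 1 (r + 1), if k ∣ m then (if m / k = k then k else k + m / k) else 0 := by
      rw [← Finset.sum_subset (Finset.Ico_subset_Ico (le_refl 1) (show r + 1 ≤ m + 1 by have := Nat.sqrt_le_self m; omega))
        (by intro x hx hnx
            simp only [Finset.mem_Ico] at hx hnx
            have hxr : ¬ x ≤ r := by omega
            simp [hxr])]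
      apply Finset.sum_congr rfl
      intro k hk
      simp only [Finset.mem_Ico] at hk
      have hkr : k ≤ r := by omega
      simp [hkr]
    have step2 : ∀ k ∈ m.divisors,
        (if k ≤ r then (if m / k = k then k else k + m / k) else 0)
          = (if k ≤ r then k else 0) + (if r < m / k then m / k else 0) := by
      intro k hk
      rw [Nat.mem_divisors] at hk
      have hk1 : 1 ≤ k := Nat.pos_of_dvd_of_pos hk.1 (by omega)
      have hiff := sqrt_split m k hm hk.1 hk1
      by_cases h1 : k ≤ r
      · by_cases h2 : m / k = k
        · rw [if_pos h1, if_pos h2, if_pos h1, if_neg (by rw [hiff]; tauto)]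
          omega
        · rw [if_pos h1, if_neg h2, if_pos h1, if_pos (hiff.mpr ⟨h1, h2⟩)]
      · rw [if_neg h1, if_neg h1, if_neg (by rw [hiff]; tauto)]
    have step3 : (∑ k ∈ m.divisors, if r < m / k then m / k else 0)
        = ∑ k ∈ m.divisors, if r < k then k else 0 :=
      Nat.sum_div_divisors m (fun x => if r < x then x else 0)
    unfold BsumNat
    rw [← step1, ← Finset.sum_filter, ← hdiv]
    rw [Finset.sum_congr rfl step2, Finset.sum_add_distrib, step3, ← Finset.sum_add_distrib]
    apply Finset.sum_congr rfl
    intro k _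
    split_ifs <;> omega
  omega

-- ===== VERDICT (by name: the statement is the Claim_ definition above) =====
theorem est_presque_parfait_spec : Claim_unchanged_est_presque_parfait := by
  intro n _ hnd
  unfold D_est_presque_parfait at hnd
  by_cases hn : n ≤ 0
  · have hnil : PySem.List.pyRange 1 n 1 = [] := PySem.List.pyRange_one_eq_nil (by omega)
    simp only [est_presque_parfait, est_presque_parfait_alt, hnil, List.foldl_nil, if_pos hn]
    simp only [Bool.or_eq_false_iff, beq_eq_false_iff_ne, ne_eq]
    omega
  · have hm : n = ((n.toNat : Nat) : Int) := by omega
    set m := n.toNat with hmdef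
    have hm1 : 1 ≤ m := by omega
    rw [hm]
    simp only [est_presque_parfait, est_presque_parfait_alt, asum_eq m]
    rw [if_neg (by exact_mod_cast by omega : ¬ ((m : Int) ≤ 0))]
    have hb : est_presque_parfait_altLoop (m : Int) 1 0 = 0 + ((BsumNat m : Nat) : Int) := by
      have h := bloop_eq m (Nat.sqrt m + 1) 1 0 (by omega) (by omega)
      unfold BsumNat
      exact_mod_cast h
    rw [hb, pair_sum m hm1]
    have hs : (0:Int) + ((AsumNat m + m : Nat) : Int) - (m : Int) = (AsumNat m : Int) := by
      push_cast; ring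
    rw [hs]

theorem est_presque_parfait_changed : Claim_changed_est_presque_parfait := by
  unfold Claim_changed_est_presque_parfait; decide

theorem est_presque_parfait_tight : Claim_exact_est_presque_parfait := by
  intro n _ hd
  unfold D_est_presque_parfait at hd
  subst hd
  decide
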